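-- pv_equiv track=rewrite | github.com/moehw/BCH-codes | bch/finitefield.py | binary_to_string
-- ===== SOURCE A (Python) =====
-- def is_bit_set(polynomial, n):
--     """
--     Checks if bit is setted.
--
--     :param polynomial: a polynomial
--     to check.
--     :param n: a position of bit to
--     check.
--
--     :returns: a status of bit.
--     """
--     return (polynomial & (1 << n))
--
-- def binary_to_string(polynomial, direction_polynomial=True):
--     """
--     Represents binary polynomial in
--     user-friendly form.
--
--     :param polynomial: a polynomial to
--     convert.
--     :param direction_polynomial: if true,
--     use "+" delimeter and starts from higher
--     power. Otherwise, delimeter is "," and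
--     from lower power.
--
--     :returns: a string of polynomial.
--     """
--
--     if polynomial == 0:
--         return "0"
--
--     superscript = str.maketrans("0123456789", "⁰¹²³⁴⁵⁶⁷⁸⁹")
--     s = "" if not is_bit_set(polynomial, 0) else "1"
--     for i in range(1, msb(polynomial) + 1):
--         if is_bit_set(polynomial, i):
--             if direction_polynomial:
--                 s = "x" + ("" if i == 1 else str(i).translate(superscript)) + \
--                     ("" if s == "" else " + ") + s
--             else:
--                 s += ("" if s == "" else ", ") + \
--                     "x" + ("" if i == 1 else str(i).translate(superscript))
--     return s
--
-- def msb(number):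
--     """
--     Most significant bit (MSB).
--     Position starts from zero.
--
--     :param number: a binary
--     number to check.
--
--     :returns: a position of
--     most significant bit.
--     """
--
--     position = 0
--     number = number >> 1
--
--     while number != 0:
--         position += 1
--         number = number >> 1
--
--     return position
-- ===== SOURCE B (Python) =====
-- def binary_to_string(polynomial, direction_polynomial=True):
--     """Represents binary polynomial in user-friendly form (list-of-terms + join)."""
--     if polynomial == 0:
--         return "0"
--     superscript = str.maketrans("0123456789", "⁰¹²³⁴⁵⁶⁷⁸⁹")
--     terms = []
--     p = polynomial
--     i = 0
--     while p != 0: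
--         if p & 1:
--             terms.append("1" if i == 0 else "x" if i == 1 else "x" + str(i).translate(superscript))
--         p >>= 1
--         i += 1
--     if direction_polynomial:
--         return " + ".join(reversed(terms))
--     return ", ".join(terms)
-- ===== Notes on version B (the rewrite author's own statement) =====
-- stated objective: simpler
-- what changed: B scans the bits of the polynomial itself (shifting p right, no msb call and no is_bit_set masking), collects each term string in a list, and produces the result with a single join, instead of A's index loop over range(1, msb+1) that rebuilds the accumulated string by concatenation at every set bit.
import Mathlib
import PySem

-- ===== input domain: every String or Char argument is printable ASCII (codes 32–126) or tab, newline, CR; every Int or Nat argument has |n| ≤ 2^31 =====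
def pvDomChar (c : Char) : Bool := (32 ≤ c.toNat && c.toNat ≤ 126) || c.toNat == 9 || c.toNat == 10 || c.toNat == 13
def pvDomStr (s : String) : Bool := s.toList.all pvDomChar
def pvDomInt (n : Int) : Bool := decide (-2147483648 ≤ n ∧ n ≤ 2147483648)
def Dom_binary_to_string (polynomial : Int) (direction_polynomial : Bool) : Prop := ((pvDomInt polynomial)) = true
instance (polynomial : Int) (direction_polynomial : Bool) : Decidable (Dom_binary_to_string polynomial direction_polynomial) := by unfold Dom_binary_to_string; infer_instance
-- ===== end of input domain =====

-- B builds the list of term strings once and joins it, instead of A's in-loop string concatenation; objective: simpler.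
-- Python's msb loops forever on negative input, so Pre_ restricts to 0 ≤ polynomial; strings are ported as List Char
-- (Python + on str = List.append) and packed with String.mk at the end.

-- ===== PORT A =====
-- str.maketrans("0123456789", "⁰¹²³⁴⁵⁶⁷⁸⁹") + str.translate: map each digit to its superscript
def supChar (c : Char) : Char :=
  if c = '0' then '⁰' else if c = '1' then '¹' else if c = '2' then '²' else if c = '3' then '³'
  else if c = '4' then '⁴' else if c = '5' then '⁵' else if c = '6' then '⁶' else if c = '7' then '⁷'
  else if c = '8' then '⁸' else if c = '9' then '⁹' else c

def translateSup (cs : List Char) : List Char := cs.map supChar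

-- msb: while number != 0: position += 1; number >>= 1 — faithful for number ≥ 0 (Pre_);
-- on negative input Python loops forever, which Pre_ excludes.
def msbGo (n pos : Nat) : Nat :=
  if n = 0 then pos else msbGo (n >>> 1) (pos + 1)
  termination_by n
  decreasing_by simp [Nat.shiftRight_one]; omega

def msb (number : Int) : Nat := msbGo (number.toNat >>> 1) 0

-- is_bit_set: polynomial & (1 << n), used for its truthiness; on the nonnegative domain Python's
-- int bit-and equals Nat's (&&&)
def isBitSet (m : Nat) (n : Nat) : Bool := decide (m &&& (1 <<< n) ≠ 0)

def binary_to_string (polynomial : Int) (direction_polynomial : Bool) : String :=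
  if polynomial = 0 then "0"
  else
    let m := polynomial.toNat
    let s0 : List Char := if isBitSet m 0 then ['1'] else []
    let s := (List.range' 1 (msb polynomial)).foldl (fun s i =>
      if isBitSet m i then
        if direction_polynomial then
          ('x' :: (if i = 1 then [] else translateSup (PySem.Int.toChars (i : Int))))
            ++ (if s = [] then [] else [' ', '+', ' ']) ++ s
        else
          s ++ (if s = [] then [] else [',', ' '])
            ++ ('x' :: (if i = 1 then [] else translateSup (PySem.Int.toChars (i : Int))))
      else s) s0
    String.mk s

-- ===== PORT B =====
-- "1" if i == 0 else "x" if i == 1 else "x" + str(i).translate(superscript)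
def termChars (i : Nat) : List Char :=
  if i = 0 then ['1'] else if i = 1 then ['x'] else 'x' :: translateSup (PySem.Int.toChars (i : Int))

-- while p != 0: if p & 1: terms.append(term(i)); p >>= 1; i += 1
def btermsGo (p i : Nat) : List (List Char) :=
  if p = 0 then []
  else (if p &&& 1 ≠ 0 then [termChars i] else []) ++ btermsGo (p >>> 1) (i + 1)
  termination_by p
  decreasing_by simp [Nat.shiftRight_one]; omega

def binary_to_string_alt (polynomial : Int) (direction_polynomial : Bool) : String :=
  if polynomial = 0 then "0"
  else
    let terms := btermsGo polynomial.toNat 0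
    if direction_polynomial then String.mk (PySem.Chars.join [' ', '+', ' '] terms.reverse)
    else String.mk (PySem.Chars.join [',', ' '] terms)

-- ===== PRECONDITION & SPEC =====
-- Pre_ excludes negative polynomials: there Python's msb (number >>= 1 on a negative int) never reaches 0, so A never returns.
def Pre_binary_to_string (polynomial : Int) (direction_polynomial : Bool) : Prop := 0 ≤ polynomial
instance (polynomial : Int) (direction_polynomial : Bool) : Decidable (Pre_binary_to_string polynomial direction_polynomial) := by unfold Pre_binary_to_string; infer_instance
def pvWitness_binary_to_string : Int × Bool := (11, true)

def Spec_binary_to_string (polynomial : Int) (direction_polynomial : Bool) (out : String) : Prop := out = binary_to_string_alt polynomial direction_polynomial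
instance (polynomial : Int) (direction_polynomial : Bool) (out : String) : Decidable (Spec_binary_to_string polynomial direction_polynomial out) := by unfold Spec_binary_to_string; infer_instance

-- ===== CLAIM (what is proved, stated in full; the proofs are below) =====
def Claim_equal_binary_to_string : Prop := ∀ (polynomial : Int) (direction_polynomial : Bool), Dom_binary_to_string polynomial direction_polynomial → Pre_binary_to_string polynomial direction_polynomial → Spec_binary_to_string polynomial direction_polynomial (binary_to_string polynomial direction_polynomial)

-- ===== LEMMAS AND PROOFS =====

-- proof-only helpers: positions of set bits, bit length
def bitsOf (p : Nat) : List Nat :=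
  if p = 0 then [] else (if p &&& 1 ≠ 0 then [0] else []) ++ (bitsOf (p >>> 1)).map (· + 1)
  termination_by p
  decreasing_by simp [Nat.shiftRight_one]; omega

def blen (p : Nat) : Nat :=
  if p = 0 then 0 else blen (p >>> 1) + 1
  termination_by p
  decreasing_by simp [Nat.shiftRight_one]; omega

lemma termChars_ne_nil (i : Nat) : termChars i ≠ [] := by
  unfold termChars; split_ifs <;> simp

lemma join_term_cons_ne_nil (sep : List Char) (j : Nat) (rs : List (List Char)) :
    PySem.Chars.join sep (termChars j :: rs) ≠ [] := by
  cases rs with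
  | nil => simpa [PySem.Chars.join_singleton] using termChars_ne_nil j
  | cons b l =>
      rw [PySem.Chars.join_cons_cons]
      simp [List.append_eq_nil_iff, termChars_ne_nil j]

lemma foldl_ite_filter {α β : Type} (f : α → β → α) (c : β → Bool) :
    ∀ (l : List β) (s : α),
      l.foldl (fun s i => if c i then f s i else s) s = (l.filter c).foldl f s := by
  intro l
  induction l with
  | nil => intro s; rfl
  | cons hd tl ih =>
      intro s
      by_cases h : c hd = true <;> simp [List.foldl_cons, h, ih]

-- the "+"-direction loop: prepend with " + " unless empty ≡ join of the reversed term list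
lemma fold_dir (idxs : List Nat) :
    ∀ (rs : List (List Char)), (rs = [] ∨ ∃ j rs', rs = termChars j :: rs') →
      idxs.foldl (fun s i => termChars i ++ (if s = [] then [] else [' ', '+', ' ']) ++ s)
        (PySem.Chars.join [' ', '+', ' '] rs)
      = PySem.Chars.join [' ', '+', ' '] ((idxs.map termChars).reverse ++ rs) := by
  induction idxs with
  | nil => intro rs _; simp
  | cons i idxs ih =>
      intro rs hrs
      have hstep : termChars i ++ (if PySem.Chars.join [' ', '+', ' '] rs = [] then [] else [' ', '+', ' '])
            ++ PySem.Chars.join [' ', '+', ' '] rs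
          = PySem.Chars.join [' ', '+', ' '] (termChars i :: rs) := by
        rcases hrs with h | ⟨j, rs', h⟩
        · subst h; simp [PySem.Chars.join_nil, PySem.Chars.join_singleton]
        · subst h
          rw [if_neg (join_term_cons_ne_nil _ j rs'), PySem.Chars.join_cons_cons]
      rw [List.foldl_cons, hstep, ih (termChars i :: rs) (Or.inr ⟨i, rs, rfl⟩)]
      simp

lemma join_append_singleton (sep : List Char) (t : List Char) :
    ∀ (ts : List (List Char)) (a : List Char),
      PySem.Chars.join sep ((a :: ts) ++ [t]) = PySem.Chars.join sep (a :: ts) ++ sep ++ t := by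
  intro ts
  induction ts with
  | nil => intro a; simp [PySem.Chars.join_cons_cons, PySem.Chars.join_singleton]
  | cons b l ih =>
      intro a
      simp only [List.cons_append] at ih ⊢
      rw [PySem.Chars.join_cons_cons, ih b, PySem.Chars.join_cons_cons]
      simp [List.append_assoc]

-- the ","-direction loop: append with ", " unless empty ≡ join of the term list
lemma fold_nodir (idxs : List Nat) :
    ∀ (ts : List (List Char)), (ts = [] ∨ ∃ j ts', ts = termChars j :: ts') →
      idxs.foldl (fun s i => s ++ (if s = [] then [] else [',', ' ']) ++ termChars i)
        (PySem.Chars.join [',', ' '] ts)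
      = PySem.Chars.join [',', ' '] (ts ++ idxs.map termChars) := by
  induction idxs with
  | nil => intro ts _; simp
  | cons i idxs ih =>
      intro ts hts
      have hstep : PySem.Chars.join [',', ' '] ts ++ (if PySem.Chars.join [',', ' '] ts = [] then [] else [',', ' '])
            ++ termChars i
          = PySem.Chars.join [',', ' '] (ts ++ [termChars i]) := by
        rcases hts with h | ⟨j, ts', h⟩
        · subst h; simp [PySem.Chars.join_nil, PySem.Chars.join_singleton]
        · subst h
          rw [if_neg (join_term_cons_ne_nil _ j ts'), join_append_singleton]
      have hpres : ts ++ [termChars i] = [] ∨ ∃ j ts', ts ++ [termChars i] = termChars j :: ts' := by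
        rcases hts with h | ⟨j, ts', h⟩
        · subst h; exact Or.inr ⟨i, [], rfl⟩
        · subst h; exact Or.inr ⟨j, ts' ++ [termChars i], rfl⟩
      rw [List.foldl_cons, hstep, ih (ts ++ [termChars i]) hpres]
      simp

lemma btermsGo_eq (p : Nat) : ∀ i, btermsGo p i = (bitsOf p).map (fun j => termChars (i + j)) := by
  induction p using Nat.strong_induction_on with
  | _ p ih =>
      intro i
      rw [btermsGo, bitsOf]
      by_cases hp : p = 0
      · simp [hp]
      · have hlt : p >>> 1 < p := by simp [Nat.shiftRight_one]; omega
        rw [if_neg hp, if_neg hp, ih _ hlt (i + 1)]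
        simp only [List.map_append, List.map_map, Function.comp_def]
        split_ifs <;> simp [Nat.add_comm, Nat.add_left_comm]

lemma isBitSet_eq_testBit (p j : Nat) : isBitSet p j = p.testBit j := by
  simp only [isBitSet, Nat.one_shiftLeft, Nat.and_two_pow]
  cases h : p.testBit j <;> simp [h]

lemma isBitSet_succ (p j : Nat) : isBitSet p (j + 1) = isBitSet (p >>> 1) j := by
  simp [isBitSet_eq_testBit, Nat.testBit_add_one, Nat.shiftRight_one]

lemma isBitSet_zero (p : Nat) : isBitSet p 0 = decide (p % 2 = 1) := by
  simp [isBitSet_eq_testBit, Nat.testBit_zero]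

lemma bitsOf_eq (p : Nat) : bitsOf p = (List.range (blen p)).filter (isBitSet p) := by
  induction p using Nat.strong_induction_on with
  | _ p ih =>
      rw [bitsOf, blen]
      by_cases hp : p = 0
      · simp [hp]
      · have hlt : p >>> 1 < p := by simp [Nat.shiftRight_one]; omega
        rw [if_neg hp, if_neg hp, ih _ hlt, List.range_succ_eq_map, List.filter_cons,
          List.filter_map]
        have hcomp : (isBitSet p ∘ Nat.succ) = isBitSet (p >>> 1) := by
          funext j; exact isBitSet_succ p j
        rw [hcomp, isBitSet_zero]
        simp only [Nat.and_one_is_mod, decide_eq_true_eq]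
        split_ifs
        all_goals first | omega | simp

lemma msbGo_eq (p : Nat) : ∀ acc, msbGo p acc = acc + blen p := by
  induction p using Nat.strong_induction_on with
  | _ p ih =>
      intro acc
      rw [msbGo, blen]
      by_cases hp : p = 0
      · simp [hp]
      · have hlt : p >>> 1 < p := by simp [Nat.shiftRight_one]; omega
        rw [if_neg hp, if_neg hp, ih _ hlt]
        omega

lemma blen_pos_split (m : Nat) (hm : m ≠ 0) : blen m = blen (m >>> 1) + 1 := by
  rw [blen, if_neg hm]

-- bits of m split as: bit 0, then bits 1..msb
lemma bitsOf_split (poly : Int) (hpos : 0 < poly) :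
    bitsOf poly.toNat
      = (if isBitSet poly.toNat 0 then [0] else [])
        ++ (List.range' 1 (msb poly)).filter (isBitSet poly.toNat) := by
  have hm0 : poly.toNat ≠ 0 := by omega
  have hmsb : msb poly = blen (poly.toNat >>> 1) := by
    simp [msb, msbGo_eq]
  rw [bitsOf_eq, blen_pos_split _ hm0, ← hmsb, List.range_succ_eq_map, List.filter_cons,
    List.range'_eq_map_range, List.filter_map, List.filter_map]
  have h1 : (isBitSet poly.toNat ∘ Nat.succ) = (isBitSet poly.toNat ∘ fun x => 1 + x) := by
    funext j; simp [Function.comp, Nat.succ_eq_add_one, Nat.add_comm]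
  have h2 : (List.map Nat.succ ((List.range (msb poly)).filter (isBitSet poly.toNat ∘ Nat.succ)))
      = List.map (fun x => 1 + x) ((List.range (msb poly)).filter (isBitSet poly.toNat ∘ fun x => 1 + x)) := by
    rw [h1]; apply List.map_congr_left; intro a _; omega
  rw [h2]
  split_ifs <;> simp

-- main equivalence
lemma main_eq (poly : Int) (dir : Bool) (hpre : 0 ≤ poly) :
    binary_to_string poly dir = binary_to_string_alt poly dir := by
  by_cases h0 : poly = 0
  · simp [binary_to_string, binary_to_string_alt, h0]
  · have hpos : 0 < poly := lt_of_le_of_ne hpre (Ne.symm h0)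
    -- replace A's inline term expression by termChars (all loop indices are ≥ 1)
    have hinline : ∀ i : Nat, 1 ≤ i →
        ('x' :: (if i = 1 then [] else translateSup (PySem.Int.toChars (i : Int)))) = termChars i := by
      intro i hi
      unfold termChars
      rcases Nat.lt_or_ge i 2 with h | h
      · interval_cases i <;> simp
      · rw [if_neg (by omega), if_neg (by omega), if_neg (by omega)]
    have hterms : btermsGo poly.toNat 0
        = (if isBitSet poly.toNat 0 then [termChars 0] else [])
          ++ ((List.range' 1 (msb poly)).filter (isBitSet poly.toNat)).map termChars := by
      rw [btermsGo_eq poly.toNat 0]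
      have hz : (fun j => termChars (0 + j)) = termChars := by funext j; simp
      rw [hz, bitsOf_split poly hpos, List.map_append]
      split_ifs <;> simp
    cases dir with
    | true =>
        simp only [binary_to_string, binary_to_string_alt, if_neg h0, if_true]
        have hA : (List.range' 1 (msb poly)).foldl (fun s i =>
            if isBitSet poly.toNat i then
              ('x' :: (if i = 1 then [] else translateSup (PySem.Int.toChars (i : Int))))
                ++ (if s = [] then [] else [' ', '+', ' ']) ++ s
            else s) (if isBitSet poly.toNat 0 then ['1'] else [])
            = ((List.range' 1 (msb poly)).filter (isBitSet poly.toNat)).foldl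
                (fun s i => termChars i ++ (if s = [] then [] else [' ', '+', ' ']) ++ s)
                (if isBitSet poly.toNat 0 then ['1'] else []) := by
          rw [foldl_ite_filter]
          apply PySem.List.foldl_congr_mem
          intro s i hi
          have hmem : i ∈ List.range' 1 (msb poly) := List.mem_of_mem_filter hi
          have h1 : 1 ≤ i := (List.mem_range'_1.mp hmem).1
          rw [hinline i h1]
        rw [hA]
        have hstart : (if isBitSet poly.toNat 0 then ['1'] else ([] : List Char))
            = PySem.Chars.join [' ', '+', ' '] (if isBitSet poly.toNat 0 then [termChars 0] else []) := by
          split_ifs <;> simp [termChars]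
        have hshape : (if isBitSet poly.toNat 0 = true then [termChars 0] else ([] : List (List Char))) = []
            ∨ ∃ j rs', (if isBitSet poly.toNat 0 = true then [termChars 0] else ([] : List (List Char))) = termChars j :: rs' := by
          split_ifs
          · exact Or.inr ⟨0, [], rfl⟩
          · exact Or.inl rfl
        rw [hstart, fold_dir _ _ hshape, hterms]
        congr 1
        split_ifs <;> simp
    | false =>
        simp only [binary_to_string, binary_to_string_alt, if_neg h0, Bool.false_eq_true,
          if_false]
        have hA : (List.range' 1 (msb poly)).foldl (fun s i =>
            if isBitSet poly.toNat i then
              s ++ (if s = [] then [] else [',', ' '])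
                ++ ('x' :: (if i = 1 then [] else translateSup (PySem.Int.toChars (i : Int))))
            else s) (if isBitSet poly.toNat 0 then ['1'] else [])
            = ((List.range' 1 (msb poly)).filter (isBitSet poly.toNat)).foldl
                (fun s i => s ++ (if s = [] then [] else [',', ' ']) ++ termChars i)
                (if isBitSet poly.toNat 0 then ['1'] else []) := by
          rw [foldl_ite_filter]
          apply PySem.List.foldl_congr_mem
          intro s i hi
          have hmem : i ∈ List.range' 1 (msb poly) := List.mem_of_mem_filter hi
          have h1 : 1 ≤ i := (List.mem_range'_1.mp hmem).1
          rw [hinline i h1]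
        rw [hA]
        have hstart : (if isBitSet poly.toNat 0 then ['1'] else ([] : List Char))
            = PySem.Chars.join [',', ' '] (if isBitSet poly.toNat 0 then [termChars 0] else []) := by
          split_ifs <;> simp [termChars]
        have hshape : (if isBitSet poly.toNat 0 = true then [termChars 0] else ([] : List (List Char))) = []
            ∨ ∃ j rs', (if isBitSet poly.toNat 0 = true then [termChars 0] else ([] : List (List Char))) = termChars j :: rs' := by
          split_ifs
          · exact Or.inr ⟨0, [], rfl⟩
          · exact Or.inl rfl
        rw [hstart, fold_nodir _ _ hshape, hterms]

-- ===== VERDICT (by name: the statement is the Claim_ definition above) =====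
theorem binary_to_string_spec : Claim_equal_binary_to_string := by
  intro poly dir _ hpre
  unfold Spec_binary_to_string
  exact main_eq poly dir hpre
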